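-- pv_equiv track=rewrite | github.com/gksmf2370/KDT6 | miniproject/Python/미니숫자야구.py | compare_two
-- ===== SOURCE A (Python) =====
-- def compare_two(random_data, input_data):
--     input_data = list(map(int, input_data))
--
--     hit = 0
--     ball = 0
--     for i in range(3):
--         if input_data[i] == random_data[i]:
--             hit += 1
--         elif input_data[i] in random_data:
--             ball += 1
--
--     return hit, ball
-- ===== SOURCE B (Python) =====
-- def compare_two(random_data, input_data):
--     rset = set(random_data)
--
--     def go(pairs):
--         if not pairs:
--             return 0, 0
--         (x, y), rest = pairs[0], pairs[1:]
--         h, b = go(rest)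
--         if x == y:
--             return h + 1, b
--         if x in rset:
--             return h, b + 1
--         return h, b
--
--     return go(list(zip(map(int, input_data), random_data))[:3])
-- ===== Notes on version B (the rewrite author's own statement) =====
-- stated objective: alternative
-- what changed: Replaces A's indexed accumulator loop by a top-down recursion over the first three zipped (guess, secret) pairs that builds the (hit, ball) pair on the way back, with ball membership tested against a precomputed set of the secret digits instead of scanning the list per position.
import Mathlib
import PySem

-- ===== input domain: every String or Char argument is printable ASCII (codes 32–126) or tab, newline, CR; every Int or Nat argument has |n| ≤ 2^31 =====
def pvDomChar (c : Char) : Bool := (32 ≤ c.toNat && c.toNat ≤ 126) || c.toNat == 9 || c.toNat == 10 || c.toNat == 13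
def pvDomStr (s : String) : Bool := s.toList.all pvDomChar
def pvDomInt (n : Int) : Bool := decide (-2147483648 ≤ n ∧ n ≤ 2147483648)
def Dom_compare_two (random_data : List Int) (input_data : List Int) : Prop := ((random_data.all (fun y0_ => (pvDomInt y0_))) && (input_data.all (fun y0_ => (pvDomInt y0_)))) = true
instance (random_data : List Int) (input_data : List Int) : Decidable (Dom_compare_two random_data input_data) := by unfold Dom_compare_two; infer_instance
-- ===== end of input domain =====

-- B replaces A's indexed if/elif loop by a top-down recursion over the first three zipped (guess, secret) pairs, building (hit, ball) on the way back with a precomputed set for the ball test; alternative decomposition, same cost.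


-- ===== PORT A =====
-- list(map(int, input_data)) is the identity on a list of ints; the loop keeps (hit, ball),
-- with the elif branch taken only when the hit test fails. pyGet? none cases (index out of
-- range = IndexError) are excluded by Pre_ and leave the state unchanged here.
def compare_two (random_data : List Int) (input_data : List Int) : Int × Int :=
  let input := input_data.map (fun x => x)
  (PySem.List.pyRange 0 3 1).foldl
    (fun (hb : Int × Int) i =>
      match PySem.List.pyGet? input i, PySem.List.pyGet? random_data i with
      | some x, some y =>
          if x = y then (hb.1 + 1, hb.2)
          else if x ∈ random_data then (hb.1, hb.2 + 1)
          else hb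
      | _, _ => hb)
    (0, 0)

-- ===== PORT B =====
-- recursion 'go' over the zipped pairs, building the (hit, ball) pair on the way back;
-- membership tested against set(random_data) built once
def pvGo (rset : PySem.Set Int) : List (Int × Int) → Int × Int
  | [] => (0, 0)
  | (x, y) :: rest =>
      let hb := pvGo rset rest
      if x = y then (hb.1 + 1, hb.2)
      else if PySem.Set.contains rset x then (hb.1, hb.2 + 1)
      else hb

def compare_two_alt (random_data : List Int) (input_data : List Int) : Int × Int :=
  let rset := PySem.Set.ofList random_data
  pvGo rset (((input_data.map (fun x => x)).zip random_data).take 3)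

-- ===== PRECONDITION & SPEC =====
-- Pre_ excludes only inputs where A raises IndexError (a list shorter than 3).
def Pre_compare_two (random_data : List Int) (input_data : List Int) : Prop :=
  3 ≤ random_data.length ∧ 3 ≤ input_data.length
instance (random_data : List Int) (input_data : List Int) : Decidable (Pre_compare_two random_data input_data) := by unfold Pre_compare_two; infer_instance
def pvWitness_compare_two : List Int × List Int := ([1, 2, 3], [3, 2, 1])
def Spec_compare_two (random_data : List Int) (input_data : List Int) (out : Int × Int) : Prop := out = compare_two_alt random_data input_data
instance (random_data : List Int) (input_data : List Int) (out : Int × Int) : Decidable (Spec_compare_two random_data input_data out) := by unfold Spec_compare_two; infer_instance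

-- ===== CLAIM =====
def Claim_equal_compare_two : Prop := ∀ (random_data : List Int) (input_data : List Int), Dom_compare_two random_data input_data → Pre_compare_two random_data input_data → Spec_compare_two random_data input_data (compare_two random_data input_data)

-- ===== LEMMAS AND PROOFS =====

theorem pvGet0 (x : Int) (t : List Int) : PySem.List.pyGet? (x::t) 0 = some x :=
  PySem.List.pyGet?_zero_cons x t
theorem pvGet1 (x y : Int) (t : List Int) : PySem.List.pyGet? (x::y::t) 1 = some y := by
  simp [PySem.List.pyGet?, PySem.List.pyIdx?]
theorem pvGet2 (x y z : Int) (t : List Int) : PySem.List.pyGet? (x::y::z::t) 2 = some z := by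
  simp [PySem.List.pyGet?, PySem.List.pyIdx?]
  rw [if_pos (by omega)]
  simp

theorem pvContains (l : List Int) (x : Int) :
    (PySem.Set.contains (PySem.Set.ofList l) x = true) ↔ x ∈ l := by
  simp [PySem.Set.mem_ofList]

-- ===== VERDICT =====
theorem compare_two_spec : Claim_equal_compare_two := by
  intro r i _ hpre
  obtain ⟨hr, hi⟩ := hpre
  obtain ⟨a, b, c, tr, hre⟩ : ∃ a b c t, r = a :: b :: c :: t := by
    match r, hr with | p :: q :: s :: t, _ => exact ⟨p, q, s, t, rfl⟩
  obtain ⟨x, y, z, ti, hie⟩ : ∃ x y z t, i = x :: y :: z :: t := by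
    match i, hi with | p :: q :: s :: t, _ => exact ⟨p, q, s, t, rfl⟩
  subst hre hie
  show _ = _
  simp only [compare_two, compare_two_alt,
    show PySem.List.pyRange 0 3 1 = [0, 1, 2] from by decide, List.map_id',
    List.foldl_cons, List.foldl_nil, List.zip_cons_cons, List.take_succ_cons,
    List.take_zero, pvGo, pvGet0, pvGet1, pvGet2, pvContains]
  split_ifs <;> rfl
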